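-- pv_equiv track=rewrite | github.com/Khushboo-Dar/Digital-signal-generator | files/nrz_i.py | decode_nrz_i
-- ===== SOURCE A (Python) =====
-- def decode_nrz_i(signal, voltage_level):
--     decoded_data = []
--     current_level = voltage_level
--
--     for level in signal:
--         if level == current_level:
--             decoded_data.append(0)
--         else:
--             decoded_data.append(1)
--             current_level = level
--
--     return ''.join(map(str, decoded_data))
-- ===== SOURCE B (Python) =====
-- def decode_nrz_i(levels, voltage_level):
--     # parameter renamed from 'signal' only to avoid the stdlib-module name; same positional signature
--     # Two-stage decoding: first run-length encode the signal, then decode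
--     # whole runs at once.  Adjacent runs differ by construction, so every run
--     # after the first decodes to '1' followed by count-1 zeros; only the first
--     # run's leading bit depends on the idle voltage_level.
--     runs_rev = []  # runs of equal values, collected while scanning from the right
--     for level in reversed(levels):
--         if runs_rev and runs_rev[-1][0] == level:
--             runs_rev[-1][1] += 1
--         else:
--             runs_rev.append([level, 1])
--     runs = runs_rev[::-1]
--     if not runs:
--         return ''
--     value, count = runs[0]
--     pieces = ['0' * count if value == voltage_level
--               else '1' + '0' * (count - 1)]
--     for _, count in runs[1:]:
--         pieces.append('1' + '0' * (count - 1))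
--     return ''.join(pieces)
-- ===== Notes on version B (the rewrite author's own statement) =====
-- stated objective: alternative
-- what changed: Replaces A's per-element state machine with a two-stage run-length decoding: first compress the signal into (value, count) runs, then emit '1' + '0'*(count-1) per run (only the first run is judged against voltage_level), exploiting that adjacent runs always differ.
import Mathlib
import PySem

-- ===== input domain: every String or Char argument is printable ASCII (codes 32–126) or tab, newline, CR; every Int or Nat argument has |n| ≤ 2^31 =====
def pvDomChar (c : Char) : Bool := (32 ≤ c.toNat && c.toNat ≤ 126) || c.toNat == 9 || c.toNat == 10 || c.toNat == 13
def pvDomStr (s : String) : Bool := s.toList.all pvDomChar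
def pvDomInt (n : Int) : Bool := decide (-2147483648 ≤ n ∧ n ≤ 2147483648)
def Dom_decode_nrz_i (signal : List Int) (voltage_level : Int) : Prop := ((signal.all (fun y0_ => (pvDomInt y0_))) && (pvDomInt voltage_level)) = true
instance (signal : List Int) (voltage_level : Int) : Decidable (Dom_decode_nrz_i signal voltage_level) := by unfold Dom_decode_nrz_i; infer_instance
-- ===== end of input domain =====

-- B replaces A's per-element state machine with a two-stage run-length decoding
-- (RLE pass, then whole-run emission); objective: alternative.


-- ===== PORT A =====
-- literal port of A: a fold carrying (decoded_data, current_level), appending 0/1 ints,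
-- joined at the end via str()
def decode_nrz_i (signal : List Int) (voltage_level : Int) : String :=
  let st := signal.foldl
    (fun (st : List Int × Int) level =>
      if level == st.2 then (st.1 ++ [0], st.2) else (st.1 ++ [1], level))
    ([], voltage_level)
  PySem.Str.join "" (st.1.map PySem.Int.toStr)

-- ===== PORT B =====
-- one loop body of Source B's RLE pass: inspect/update runs_rev[-1] or append a fresh run
def pvStep (rs : List (Int × Int)) (level : Int) : List (Int × Int) :=
  match rs.getLast? with
  | some last =>
      if last.1 == level then rs.dropLast ++ [(last.1, last.2 + 1)]
      else rs ++ [(level, 1)]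
  | none => [(level, 1)]

-- B: run-length encode (scanning reversed(signal)), reverse, then emit one piece per run
def decode_nrz_i_alt (signal : List Int) (voltage_level : Int) : String :=
  let runs_rev := (signal.reverse).foldl pvStep []
  let runs := runs_rev.reverse
  match runs with
  | [] => ""
  | (value, count) :: rest =>
      let pieces :=
        (if value == voltage_level
          then String.ofList (PySem.List.pyRepeat ['0'] count)
          else String.ofList ('1' :: PySem.List.pyRepeat ['0'] (count - 1))) ::
        rest.map (fun r => String.ofList ('1' :: PySem.List.pyRepeat ['0'] (r.2 - 1)))
      PySem.Str.join "" pieces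

-- ===== PRECONDITION & SPEC =====
def Spec_decode_nrz_i (signal : List Int) (voltage_level : Int) (out : String) : Prop := out = decode_nrz_i_alt signal voltage_level
instance (signal : List Int) (voltage_level : Int) (out : String) : Decidable (Spec_decode_nrz_i signal voltage_level out) := by unfold Spec_decode_nrz_i; infer_instance

-- ===== CLAIM (what is proved, stated in full; the proofs are below) =====
def Claim_equal_decode_nrz_i : Prop := ∀ (signal : List Int) (voltage_level : Int), Dom_decode_nrz_i signal voltage_level → Spec_decode_nrz_i signal voltage_level (decode_nrz_i signal voltage_level)

-- ===== LEMMAS AND PROOFS =====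

-- the character string both sides compute: one bit per element, '1' iff it differs from its predecessor
def pvBits (v : Int) (signal : List Int) : List Char :=
  ((v :: signal).zip signal).map (fun pc => if pc.2 == pc.1 then '0' else '1')

-- A's fold prefixes whatever is already in the accumulator
theorem pvFold_acc (signal : List Int) (v : Int) (acc : List Int) :
    (signal.foldl
      (fun (st : List Int × Int) level =>
        if level == st.2 then (st.1 ++ [0], st.2) else (st.1 ++ [1], level))
      (acc, v)) =
    (acc ++ (signal.foldl
      (fun (st : List Int × Int) level =>
        if level == st.2 then (st.1 ++ [0], st.2) else (st.1 ++ [1], level))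
      ([], v)).1,
     (signal.foldl
      (fun (st : List Int × Int) level =>
        if level == st.2 then (st.1 ++ [0], st.2) else (st.1 ++ [1], level))
      ([], v)).2) := by
  induction signal generalizing v acc with
  | nil => simp
  | cons a tl ih =>
    rw [List.foldl_cons, List.foldl_cons]
    dsimp only
    by_cases h : a = v
    · rw [if_pos (by simp [h]), if_pos (by simp [h])]
      rw [ih v (acc ++ [0]), ih v ([] ++ [0])]
      simp
    · rw [if_neg (by simp [h]), if_neg (by simp [h])]
      rw [ih a (acc ++ [1]), ih a ([] ++ [1])]
      simp

-- A's bit list equals the pairwise comparison over the shifted zip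
theorem pvFold_bits (signal : List Int) (v : Int) :
    (signal.foldl
      (fun (st : List Int × Int) level =>
        if level == st.2 then (st.1 ++ [0], st.2) else (st.1 ++ [1], level))
      ([], v)).1 =
    ((v :: signal).zip signal).map (fun pc => if pc.2 == pc.1 then (0 : Int) else 1) := by
  induction signal generalizing v with
  | nil => rfl
  | cons a tl ih =>
    rw [List.foldl_cons]
    dsimp only
    by_cases h : a = v
    · rw [if_pos (by simp [h])]
      rw [pvFold_acc tl v ([] ++ [0]), List.zip_cons_cons, List.map_cons, ih v]
      simp [h]
    · rw [if_neg (by simp [h])]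
      rw [pvFold_acc tl a ([] ++ [1]), List.zip_cons_cons, List.map_cons, ih a]
      simp [h]

-- joining str() of a 0/1 list is the corresponding character string
theorem pvJoin01 (bs : List Int) (h : ∀ b ∈ bs, b = 0 ∨ b = 1) :
    PySem.Str.join "" (bs.map PySem.Int.toStr) =
    String.ofList (bs.map (fun b => if b == 0 then '0' else '1')) := by
  apply String.toList_inj.mp
  have hchars : (bs.map PySem.Int.toStr).map String.toList
      = (bs.map (fun b => if b == 0 then '0' else '1')).map ([·]) := by
    simp only [List.map_map]
    apply List.map_congr_left
    intro b hb
    rcases h b hb with hb0 | hb0 <;> subst hb0 <;>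
      simp only [Function.comp_apply, PySem.Int.toList_toStr] <;> decide
  calc (PySem.Str.join "" (bs.map PySem.Int.toStr)).toList
      = PySem.Chars.join [] ((bs.map PySem.Int.toStr).map String.toList) := by simp [pysem]
    _ = PySem.Chars.join [] ((bs.map (fun b => if b == 0 then '0' else '1')).map ([·])) := by
          rw [hchars]
    _ = bs.map (fun b => if b == 0 then '0' else '1') := PySem.Chars.join_nil_singletons _
    _ = (String.ofList (bs.map (fun b => if b == 0 then '0' else '1'))).toList := by simp

-- A computes exactly the pairwise bit string
theorem pvA_eq (signal : List Int) (v : Int) :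
    decode_nrz_i signal v = String.ofList (pvBits v signal) := by
  have hbits : ∀ b ∈ ((v :: signal).zip signal).map
      (fun pc => if pc.2 == pc.1 then (0 : Int) else 1), b = 0 ∨ b = 1 := by
    intro b hb
    simp only [List.mem_map] at hb
    obtain ⟨pc, _, hpc⟩ := hb
    by_cases h : pc.2 = pc.1 <;> simp [h] at hpc <;> omega
  show PySem.Str.join "" _ = _
  rw [pvFold_bits, pvJoin01 _ hbits]
  simp only [pvBits, List.map_map]
  congr 1
  apply List.map_congr_left
  intro pc _
  by_cases h : pc.2 = pc.1 <;> simp [h]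

-- === B side ===

-- the RLE state step, seen from the reversed (in-order) side: cons/merge at the head
def pvConsRun (a : Int) (rs : List (Int × Int)) : List (Int × Int) :=
  match rs with
  | (v, c) :: rest => if v == a then (v, c + 1) :: rest else (a, 1) :: (v, c) :: rest
  | [] => [(a, 1)]

-- in-order runs of the signal
def pvRuns (signal : List Int) : List (Int × Int) :=
  ((signal.reverse).foldl pvStep []).reverse

theorem pvStep_reverse (rs : List (Int × Int)) (a : Int) :
    (pvStep rs a).reverse = pvConsRun a rs.reverse := by
  cases hrs : rs.reverse with
  | nil =>
    have : rs = [] := by simpa using congrArg List.reverse hrs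
    subst this
    rfl
  | cons p rest =>
    obtain ⟨v, c⟩ := p
    have hr : rs = rest.reverse ++ [(v, c)] := by
      have := congrArg List.reverse hrs
      simpa using this
    subst hr
    simp only [pvStep, pvConsRun, List.getLast?_concat, List.dropLast_concat]
    by_cases h : v = a
    · simp [h]
    · simp [h, beq_iff_eq]

theorem pvRuns_cons (a : Int) (tl : List Int) :
    pvRuns (a :: tl) = pvConsRun a (pvRuns tl) := by
  simp only [pvRuns, List.reverse_cons, List.foldl_append, List.foldl_cons, List.foldl_nil]
  exact pvStep_reverse _ a

-- every run has a positive count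
theorem pvRuns_pos (signal : List Int) : ∀ r ∈ pvRuns signal, 1 ≤ r.2 := by
  induction signal with
  | nil => simp [pvRuns]
  | cons a tl ih =>
    rw [pvRuns_cons]
    intro r hr
    unfold pvConsRun at hr
    cases htl : pvRuns tl with
    | nil => rw [htl] at hr; simp at hr; simp [hr]
    | cons p rest =>
      obtain ⟨v, c⟩ := p
      rw [htl] at hr
      have hc : 1 ≤ c := by have := ih (v, c) (by rw [htl]; simp); simpa using this
      by_cases h : v = a
      · simp [h] at hr
        rcases hr with hr | hr
        · simp [hr]; omega
        · exact ih r (by rw [htl]; simp [hr])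
      · simp [h, beq_iff_eq] at hr
        rcases hr with hr | hr | hr
        · simp [hr]
        · simp [hr]; exact hc
        · exact ih r (by rw [htl]; simp [hr])

-- the first run of a nonempty signal carries its first element
theorem pvRuns_head (a : Int) (tl : List Int) :
    ∃ c rest, pvRuns (a :: tl) = (a, c) :: rest ∧ 1 ≤ c := by
  rw [pvRuns_cons]
  unfold pvConsRun
  cases htl : pvRuns tl with
  | nil => exact ⟨1, [], rfl, le_refl 1⟩
  | cons p rest =>
    obtain ⟨v, c⟩ := p
    have hc : 1 ≤ c := by
      have := pvRuns_pos tl (v, c) (by rw [htl]; simp); simpa using this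
    by_cases h : v = a
    · subst h; exact ⟨c + 1, rest, by simp, by omega⟩
    · exact ⟨1, (v, c) :: rest, by simp [h, beq_iff_eq], le_refl 1⟩

-- the characters B emits for a run list, first run judged against v
def pvDecodeRuns (v : Int) (rs : List (Int × Int)) : List Char :=
  match rs with
  | [] => []
  | (fv, fc) :: rest =>
      (if fv == v then PySem.List.pyRepeat ['0'] fc
       else '1' :: PySem.List.pyRepeat ['0'] (fc - 1)) ++
      (rest.map (fun r => '1' :: PySem.List.pyRepeat ['0'] (r.2 - 1))).flatten

theorem pvRepeat_succ (c : Int) (h : 0 ≤ c) :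
    PySem.List.pyRepeat ['0'] (c + 1) = '0' :: PySem.List.pyRepeat ['0'] c := by
  rw [PySem.List.pyRepeat_singleton, PySem.List.pyRepeat_singleton]
  have : (c + 1).toNat = c.toNat + 1 := by omega
  rw [this, List.replicate_succ]

-- decoding the runs yields the pairwise bit string
theorem pvDecodeRuns_eq (signal : List Int) (v : Int) :
    pvDecodeRuns v (pvRuns signal) = pvBits v signal := by
  induction signal generalizing v with
  | nil => rfl
  | cons a tl ih =>
    have hbits : pvBits v (a :: tl) = (if a == v then '0' else '1') :: pvBits a tl := by
      simp [pvBits]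
    rw [pvRuns_cons, hbits]
    cases tl with
    | nil =>
      show pvDecodeRuns v (pvConsRun a (pvRuns [])) = _
      by_cases h : a = v <;>
        simp [pvRuns, pvConsRun, pvDecodeRuns, h, PySem.List.pyRepeat_singleton, pvBits]
    | cons b tl' =>
      obtain ⟨c, rest, hruns, hc⟩ := pvRuns_head b tl'
      rw [hruns]
      have ihb : pvDecodeRuns a (pvRuns (b :: tl')) = pvBits a (b :: tl') := ih a
      rw [hruns] at ihb
      by_cases h : b = a
      · subst h
        rw [show pvConsRun b ((b, c) :: rest) = (b, c + 1) :: rest by simp [pvConsRun]]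
        rw [← ihb]
        simp only [pvDecodeRuns, beq_self_eq_true, if_pos]
        by_cases hv : b = v
        · rw [if_pos (by simp [hv]), if_pos (by simp [hv]),
            pvRepeat_succ c (by omega)]
          simp
        · rw [if_neg (by simp [hv]), if_neg (by simp [hv]),
            show (c + 1 - 1 : Int) = c by ring]
          simp
      · rw [show pvConsRun a ((b, c) :: rest) = (a, 1) :: (b, c) :: rest by
          simp [pvConsRun, beq_iff_eq, h]]
        rw [← ihb]
        simp only [pvDecodeRuns, List.map_cons, List.flatten_cons]
        by_cases hv : a = v
        · rw [if_pos (by simpa using hv)]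
          have hbv : ¬ b = v := by rw [← hv]; exact h
          simp [hbv, hv, beq_iff_eq, PySem.List.pyRepeat_singleton]
        · rw [if_neg (by simpa using hv)]
          simp [h, hv, beq_iff_eq, PySem.List.pyRepeat_singleton]

-- joining with the empty separator is concatenation
theorem pvJoinNil (ps : List String) :
    PySem.Chars.join [] (ps.map String.toList) = (ps.map String.toList).flatten := by
  induction ps with
  | nil => rfl
  | cons x xs ihx =>
    cases xs with
    | nil => simp [PySem.Chars.join_singleton]
    | cons y ys => simp [PySem.Chars.join_cons_cons] at ihx ⊢; simp [ihx]

-- B's joined string is exactly pvDecodeRuns over pvRuns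
theorem pvAlt_toList (signal : List Int) (v : Int) :
    (decode_nrz_i_alt signal v).toList = pvDecodeRuns v (pvRuns signal) := by
  show (match pvRuns signal with
    | [] => ""
    | (value, count) :: rest =>
        PySem.Str.join ""
          ((if value == v
            then String.ofList (PySem.List.pyRepeat ['0'] count)
            else String.ofList ('1' :: PySem.List.pyRepeat ['0'] (count - 1))) ::
           rest.map (fun r : Int × Int => String.ofList ('1' :: PySem.List.pyRepeat ['0'] (r.2 - 1))))).toList
    = pvDecodeRuns v (pvRuns signal)
  cases hruns : pvRuns signal with
  | nil => rfl
  | cons p rest =>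
    obtain ⟨fv, fc⟩ := p
    simp only [pvDecodeRuns]
    rw [PySem.Str.toList_join, show "".toList = ([] : List Char) from rfl, pvJoinNil]
    by_cases h : fv = v <;> simp [h, List.map_map, Function.comp_def]

theorem pv_main (signal : List Int) (v : Int) :
    decode_nrz_i signal v = decode_nrz_i_alt signal v := by
  apply String.toList_inj.mp
  rw [pvAlt_toList, pvDecodeRuns_eq, pvA_eq]
  simp

-- ===== VERDICT (by name: the statement is the Claim_ definition above) =====
theorem decode_nrz_i_spec : Claim_equal_decode_nrz_i := by
  intro signal v _
  exact pv_main signal v
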